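-- pv_equiv track=rewrite | github.com/lczech/HAF-pipe | NPUTEv1/SNPData.py | getAlleles
-- ===== SOURCE A (Python) =====
-- def getAlleles(s, i):
--     '''
--     Returns the majority and minority allele for the SNP.  Ties are broken by making the first
--     known allele the majority.
--     EDITS: SIG 10/23/2019 --> only considers ACGT as possible major or minor alleles, accommodates ambiguous base codes (ie for heterozygous sites)
--     '''
--     s = s.upper().strip()
--     q = s.count('?')
--     major = ''
--     minor = ''
--     bases=("A" "C" "G" "T")
--     cts={}
--     for b in bases:
--         cts[b]=s.count(b)
--     major = sorted(cts, key=cts.get, reverse=True)[0]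
--     minor = sorted(cts, key=cts.get, reverse=True)[1]
--
--     return major, minor
-- ===== SOURCE B (Python) =====
-- def getAlleles(s, i):
--     # One-pass tally of A/C/G/T, then pick the top two by direct selection
--     # (first base in ACGT order wins ties), instead of sorting.
--     t = s.upper().strip()
--     counts = {'A': 0, 'C': 0, 'G': 0, 'T': 0}
--     for ch in t:
--         if ch in counts:
--             counts[ch] += 1
--     major = 'A'
--     for b in ('C', 'G', 'T'):
--         if counts[b] > counts[major]:
--             major = b
--     minor = None
--     for b in ('A', 'C', 'G', 'T'):
--         if b != major and (minor is None or counts[b] > counts[minor]):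
--             minor = b
--     return major, minor
-- ===== Notes on version B (the rewrite author's own statement) =====
-- stated objective: simpler
-- what changed: B replaces A's four substring-count passes plus two full sorts of the counts dict with a single tally pass over the string and direct selection of the top-two bases (first base in ACGT order wins ties).
import Mathlib
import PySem

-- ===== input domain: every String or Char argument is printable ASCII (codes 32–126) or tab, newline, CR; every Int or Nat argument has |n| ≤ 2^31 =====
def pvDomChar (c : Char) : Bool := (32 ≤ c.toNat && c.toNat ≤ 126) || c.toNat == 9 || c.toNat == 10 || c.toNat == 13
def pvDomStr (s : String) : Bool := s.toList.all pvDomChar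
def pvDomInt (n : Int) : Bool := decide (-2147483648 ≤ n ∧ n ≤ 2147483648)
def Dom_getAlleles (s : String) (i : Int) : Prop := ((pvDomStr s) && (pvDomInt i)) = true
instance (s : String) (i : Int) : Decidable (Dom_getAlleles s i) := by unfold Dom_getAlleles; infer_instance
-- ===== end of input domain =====

-- B replaces A's build-a-dict-and-sort-twice with a single tally pass and direct
-- selection of the top two bases (first base in ACGT order wins ties): objective = simpler.

-- ===== PORT A =====
-- literal transliteration of Source A: upper/strip, count '?' (unused), counts dict over
-- the chars of "ACGT", then sorted(cts, key=cts.get, reverse=True) taken at [0] and [1]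
def getAlleles (s : String) (i : Int) : String × String :=
  let t := PySem.Str.strip (PySem.Str.upper s)
  let _q := PySem.Str.count t "?"
  let bases : List Char := "ACGT".toList
  let cts : PySem.Dict Char Int :=
    bases.foldl (fun d b => d.insert b ((PySem.Str.count t (String.ofList [b]) : Int))) PySem.Dict.empty
  let major := (PySem.List.sorted cts.keys (fun b => cts.getD b 0) true)[0]!
  let minor := (PySem.List.sorted cts.keys (fun b => cts.getD b 0) true)[1]!
  (String.ofList [major], String.ofList [minor])

-- ===== PORT B =====
-- literal transliteration of Source B: one tally pass over the string, then select the
-- majority and then the minority by direct comparison scans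
def getAlleles_alt (s : String) (i : Int) : String × String :=
  let t := PySem.Str.strip (PySem.Str.upper s)
  let counts0 : PySem.Dict Char Int :=
    (((PySem.Dict.empty.insert 'A' 0).insert 'C' 0).insert 'G' 0).insert 'T' 0
  let counts := t.toList.foldl
    (fun d ch => if d.contains ch then d.modify ch 0 (· + 1) else d) counts0
  let major := ['C','G','T'].foldl
    (fun mj b => if counts.getD b 0 > counts.getD mj 0 then b else mj) 'A'
  let minor := ['A','C','G','T'].foldl
    (fun mn b =>
      if b ≠ major then
        match mn with
        | none => some b
        | some m => if counts.getD b 0 > counts.getD m 0 then some b else mn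
      else mn) none
  (String.ofList [major], String.ofList [minor.getD 'A'])

-- ===== PRECONDITION & SPEC =====
def Spec_getAlleles (s : String) (i : Int) (out : String × String) : Prop := out = getAlleles_alt s i
instance (s : String) (i : Int) (out : String × String) : Decidable (Spec_getAlleles s i out) := by unfold Spec_getAlleles; infer_instance

-- ===== CLAIM (what is proved, stated in full; the proofs are below) =====
def Claim_equal_getAlleles : Prop := ∀ (s : String) (i : Int), Dom_getAlleles s i → Spec_getAlleles s i (getAlleles s i)

-- ===== LEMMAS AND PROOFS =====

-- s.count(c) for a single character equals the character count of the list
lemma count_go_single (c : Char) : ∀ (fuel : Nat) (l : List Char) (acc : Nat),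
    l.length ≤ fuel →
    PySem.Chars.count.go [c] fuel l acc = acc + l.count c := by
  intro fuel
  induction fuel with
  | zero =>
    intro l acc h
    cases l with
    | nil => simp [PySem.Chars.count.go]
    | cons x xs => simp at h
  | succ n ih =>
    intro l acc h
    cases l with
    | nil => simp [PySem.Chars.count.go]
    | cons x xs =>
      simp only [PySem.Chars.count.go, List.isPrefixOf]
      by_cases hc : c == x
      · rw [if_pos (by simp [hc])]
        rw [show List.drop ([c].length) (x :: xs) = xs by simp]
        rw [ih xs (acc + 1) (by simpa using h)]
        have hxc : x = c := (beq_iff_eq.mp hc).symm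
        simp [hxc]
        omega
      · rw [if_neg (by simp [hc])]
        rw [ih xs acc (by simpa using h)]
        have hxc : ¬ x = c := fun e => hc (by simp [e])
        simp [hxc]

lemma str_count_single (t : String) (c : Char) :
    PySem.Str.count t (String.ofList [c]) = t.toList.count c := by
  rw [PySem.Str.count_eq]
  rw [show (String.ofList [c]).toList = [c] by simp]
  unfold PySem.Chars.count
  rw [if_neg (by simp)]
  rw [count_go_single c _ t.toList 0 (by simp)]
  omega

-- the guarded tally loop of B adds the character count to every key already present
lemma tally_getD (l : List Char) :
    ∀ (d : PySem.Dict Char Int) (k : Char), d.contains k = true →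
    (l.foldl (fun d ch => if d.contains ch then d.modify ch 0 (· + 1) else d) d).getD k 0
      = d.getD k 0 + l.count k := by
  induction l with
  | nil => intro d k _; simp
  | cons x xs ih =>
    intro d k hk
    simp only [List.foldl_cons]
    by_cases hx : d.contains x = true
    · rw [if_pos hx]
      rw [ih _ k (by simp [PySem.Dict.contains_modify, hk])]
      rw [PySem.Dict.getD_modify]
      by_cases e : k = x
      · simp [e]; omega
      · simp [e, Ne.symm e]
    · rw [if_neg hx]
      rw [ih _ k hk]
      have e : ¬ x = k := fun h => hx (h ▸ hk)
      simp [e]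

lemma insertBy_nil {α : Type} (before : α → α → Bool) (x : α) :
    PySem.List.insertBy before x [] = [x] := rfl

lemma insertBy_cons {α : Type} (before : α → α → Bool) (x y : α) (ys : List α) :
    PySem.List.insertBy before x (y :: ys)
      = if before x y then x :: y :: ys else y :: PySem.List.insertBy before x ys := rfl

-- the top-two of the stable descending sort of the four bases equals B's direct selection,
-- whenever the two dicts agree on the four counts
set_option maxHeartbeats 4000000 in
lemma pick_core (va vc vg vt : Int) (d e : PySem.Dict Char Int)
    (hkeys : d.keys = ['A','C','G','T'])
    (gA : d.getD 'A' 0 = va) (gC : d.getD 'C' 0 = vc)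
    (gG : d.getD 'G' 0 = vg) (gT : d.getD 'T' 0 = vt)
    (eA : e.getD 'A' 0 = va) (eC : e.getD 'C' 0 = vc)
    (eG : e.getD 'G' 0 = vg) (eT : e.getD 'T' 0 = vt) :
    (String.ofList [(PySem.List.sorted d.keys (fun b => d.getD b 0) true)[0]!],
     String.ofList [(PySem.List.sorted d.keys (fun b => d.getD b 0) true)[1]!])
    = (String.ofList [['C','G','T'].foldl (fun mj b => if e.getD b 0 > e.getD mj 0 then b else mj) 'A'],
       String.ofList [(['A','C','G','T'].foldl (fun mn b =>
         if b ≠ ['C','G','T'].foldl (fun mj b => if e.getD b 0 > e.getD mj 0 then b else mj) 'A' then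
           match mn with
           | none => some b
           | some m => if e.getD b 0 > e.getD m 0 then some b else mn
         else mn) (none : Option Char)).getD 'A'])
     := by
  rw [hkeys]
  rw [PySem.List.sorted_rev_eq_foldl_insertBy]
  clear hkeys
  by_cases h1 : va < vc <;> by_cases h2 : va < vg <;> by_cases h3 : vc < vg <;>
    by_cases h4 : va < vt <;> by_cases h5 : vc < vt <;> by_cases h6 : vg < vt <;>
    simp [insertBy_nil, insertBy_cons, gA, gC, gG, gT, eA, eC, eG, eT, h1, h2, h3, h4, h5, h6]

set_option maxHeartbeats 1600000 in
-- ===== VERDICT =====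
theorem getAlleles_spec : Claim_equal_getAlleles := by
  intro s i _
  unfold Spec_getAlleles getAlleles getAlleles_alt
  simp only []
  set t := PySem.Str.strip (PySem.Str.upper s) with ht
  have hb : ("ACGT".toList) = ['A','C','G','T'] := by decide
  rw [hb]
  -- A-side dict
  have hcts : (['A','C','G','T'].foldl
      (fun d b => d.insert b ((PySem.Str.count t (String.ofList [b]) : Int))) PySem.Dict.empty)
      = (((PySem.Dict.empty.insert 'A' ((t.toList.count 'A' : Int))).insert 'C'
          ((t.toList.count 'C' : Int))).insert 'G' ((t.toList.count 'G' : Int))).insert 'T'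
          ((t.toList.count 'T' : Int)) := by
    simp only [List.foldl, str_count_single]
  rw [hcts]
  -- B-side tally dict getD values
  have htally : ∀ k : Char, k ∈ (['A','C','G','T'] : List Char) →
      (t.toList.foldl (fun d ch => if d.contains ch then d.modify ch 0 (· + 1) else d)
        ((((PySem.Dict.empty.insert 'A' (0:Int)).insert 'C' 0).insert 'G' 0).insert 'T' 0)).getD k 0
      = (t.toList.count k : Int) := by
    intro k hk
    fin_cases hk <;>
      rw [tally_getD t.toList _ _ (by decide)] <;>
      rw [show ((((PySem.Dict.empty.insert 'A' (0:Int)).insert 'C' 0).insert 'G' 0).insert 'T' 0).getD _ 0 = (0:Int) by decide] <;>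
      ring
  exact pick_core ((t.toList.count 'A' : Int)) ((t.toList.count 'C' : Int))
    ((t.toList.count 'G' : Int)) ((t.toList.count 'T' : Int))
    ((((PySem.Dict.empty.insert 'A' ((t.toList.count 'A' : Int))).insert 'C'
        ((t.toList.count 'C' : Int))).insert 'G' ((t.toList.count 'G' : Int))).insert 'T'
        ((t.toList.count 'T' : Int)))
    (t.toList.foldl (fun d ch => if d.contains ch then d.modify ch 0 (· + 1) else d)
      ((((PySem.Dict.empty.insert 'A' (0:Int)).insert 'C' 0).insert 'G' 0).insert 'T' 0))
    rfl rfl rfl rfl rfl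
    (htally 'A' (by decide)) (htally 'C' (by decide)) (htally 'G' (by decide)) (htally 'T' (by decide))
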